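-- pv_equiv track=rewrite | github.com/steve2972/Algorithms | Baekjoon/21611.py | pop
-- ===== SOURCE A (Python) =====
-- def pop(q):
--     ref,cnt,total,ans,nq = q[0],0,0,0,q[:]
--     for idx,i in enumerate([*q,0]):
--         if i==ref: cnt+=1
--         else:
--             if cnt >3:
--                 nq[idx-cnt-total:] = q[idx:]
--                 ans += ref*cnt
--                 total+=cnt
--             ref,cnt=i,1
--     return nq,ans
-- ===== SOURCE B (Python) =====
-- # alternative to A: groups q into maximal runs and emits the result directly, instead of A's in-place slice assignments on a copy of q
-- def pop(q):
--     # single pass: group q into maximal runs, drop runs of length >= 4, sum the dropped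
--     runs = []
--     for x in q:
--         if runs and runs[-1][0] == x:
--             runs[-1][1] += 1
--         else:
--             runs.append([x, 1])
--     nq, ans = [], 0
--     for v, c in runs:
--         if c >= 4:
--             ans += v * c
--         else:
--             nq.extend([v] * c)
--     return nq, ans
-- ===== Notes on version B (the rewrite author's own statement) =====
-- stated objective: alternative
-- what changed: B replaces A's in-place slice-assignment surgery on a copy of q (driven by enumerate indices and a running removal offset) by a direct two-phase pass: group q into maximal runs, then emit kept runs and sum removed ones; same cost on typical inputs, no index arithmetic.
-- intended difference: On lists whose last four elements are zeros, A's appended sentinel merges with that trailing zero run, so A never flushes it and returns it inside nq, while B removes every run of length at least four; the sum is the same either way because removed zeros add nothing, and B's is the intended 'remove all long runs' behaviour (the corner is unreachable in A's game, whose marble numbers are positive). — e.g. on pop([0, 0, 0, 0]): A returns ([0, 0, 0, 0], 0), B returns ([], 0)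
import Mathlib
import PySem

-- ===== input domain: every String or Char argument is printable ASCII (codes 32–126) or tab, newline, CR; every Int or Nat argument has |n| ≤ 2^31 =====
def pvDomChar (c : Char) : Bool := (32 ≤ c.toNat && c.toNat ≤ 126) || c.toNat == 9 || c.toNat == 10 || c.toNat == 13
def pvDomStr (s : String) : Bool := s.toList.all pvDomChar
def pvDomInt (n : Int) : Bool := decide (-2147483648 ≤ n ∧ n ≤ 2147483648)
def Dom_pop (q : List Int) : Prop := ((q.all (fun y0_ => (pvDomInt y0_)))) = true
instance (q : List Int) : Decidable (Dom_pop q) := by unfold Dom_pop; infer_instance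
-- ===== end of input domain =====

-- B replaces A's in-place slice-assignment surgery on a copy of q by a run-grouping pass (group maximal
-- runs, emit kept ones, sum removed ones); on lists ending in four or more zeros (see D_pop) B removes
-- the trailing zero run where A's sentinel keeps it.


-- ===== PORT A =====
-- loop body of A: state is (ref, cnt, total, ans, nq), element is (idx, i) from enumerate
def stepA (q : List Int) (st : Int × Int × Int × Int × List Int) (p : Int × Int) :
    Int × Int × Int × Int × List Int :=
  match st, p with
  | (ref, cnt, total, ans, nq), (idx, i) =>
    if i = ref then (ref, cnt + 1, total, ans, nq)
    else
      if cnt > 3 then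
        -- nq[idx-cnt-total:] = q[idx:]; ans += ref*cnt; total += cnt; ref,cnt = i,1
        (i, 1, total + cnt, ans + ref * cnt,
          PySem.List.slice nq none (some (idx - cnt - total)) ++ PySem.List.slice q (some idx) none)
      else (i, 1, total, ans, nq)

def pop (q : List Int) : List Int × Int :=
  match PySem.List.pyGet? q 0 with
  | none => ([], 0)  -- q = []: Python raises IndexError here; excluded by Pre_pop
  | some ref0 =>
    let st := (PySem.List.enumerate (q ++ [0]) 0).foldl (stepA q) (ref0, 0, 0, 0, q)
    (st.2.2.2.2, st.2.2.2.1)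

-- ===== PORT B =====
-- first pass of B: build the list of maximal runs [(value, count), …]
def stepRuns (runs : List (Int × Int)) (x : Int) : List (Int × Int) :=
  match runs.getLast? with
  | some (v, c) => if v = x then runs.dropLast ++ [(v, c + 1)] else runs ++ [(x, 1)]
  | none => [(x, 1)]

-- second pass of B: drop runs of length ≥ 4 into the sum, keep the others
def stepOut (p : List Int × Int) (vc : Int × Int) : List Int × Int :=
  if vc.2 ≥ 4 then (p.1, p.2 + vc.1 * vc.2)
  else (p.1 ++ List.replicate vc.2.toNat vc.1, p.2)

def pop_alt (q : List Int) : List Int × Int :=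
  (q.foldl stepRuns []).foldl stepOut ([], 0)

-- ===== PRECONDITION & SPEC =====
-- Pre_pop excludes only the empty list, on which A raises IndexError at q[0].
def Pre_pop (q : List Int) : Prop := q ≠ []
instance (q : List Int) : Decidable (Pre_pop q) := by unfold Pre_pop; infer_instance
def pvWitness_pop : List Int := [1, 1, 2, 2, 2, 2, 3]

-- On lists whose last four elements are zeros, A's appended sentinel merges with the trailing zero run,
-- so A never flushes it and keeps it in nq, while B removes every run of length at least four (the sum
-- is the same either way); B's is the intended behaviour, and the corner is unreachable in A's game,
-- whose marble numbers are positive.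
def D_pop (q : List Int) : Prop := ([0, 0, 0, 0] : List Int) <:+ q
instance (q : List Int) : Decidable (D_pop q) := by unfold D_pop; infer_instance

def Spec_pop (q : List Int) (out : List Int × Int) : Prop := ¬ D_pop q → out = pop_alt q
instance (q : List Int) (out : List Int × Int) : Decidable (Spec_pop q out) := by
  unfold Spec_pop; infer_instance

def pvDiffWitness_pop : List Int := [0, 0, 0, 0]
def pvDiffWitnessOut_pop : (List Int × Int) × (List Int × Int) := (([0, 0, 0, 0], 0), ([], 0))

-- ===== CLAIM (what is proved, stated in full; the proofs are below) =====
def Claim_unchanged_pop : Prop := ∀ (q : List Int), Dom_pop q → Pre_pop q → Spec_pop q (pop q)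
def Claim_changed_pop : Prop :=
  Dom_pop (pvDiffWitness_pop) ∧ Pre_pop (pvDiffWitness_pop) ∧ D_pop (pvDiffWitness_pop) ∧
  pop (pvDiffWitness_pop) = pvDiffWitnessOut_pop.1 ∧
  pop_alt (pvDiffWitness_pop) = pvDiffWitnessOut_pop.2 ∧
  pvDiffWitnessOut_pop.1 ≠ pvDiffWitnessOut_pop.2
def Claim_exact_pop : Prop :=
  ∀ (q : List Int), Dom_pop q → Pre_pop q → D_pop q → pop q ≠ pop_alt q
-- ===== LEMMAS AND PROOFS =====

-- A's run-by-run result: process the current run (ref, repeated cnt times) followed by body, with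
-- A's sentinel rule at the end (a final run of the sentinel value 0 is never flushed).
def runA (ref : Int) (cnt : Nat) : List Int → List Int × Int
  | [] =>
    if ref = 0 then (List.replicate cnt ref, 0)
    else if (cnt : Int) > 3 then ([], ref * cnt)
    else (List.replicate cnt ref, 0)
  | x :: xs =>
    if x = ref then runA ref (cnt + 1) xs
    else if (cnt : Int) > 3 then ((runA x 1 xs).1, ref * cnt + (runA x 1 xs).2)
    else (List.replicate cnt ref ++ (runA x 1 xs).1, (runA x 1 xs).2)

-- B's run-by-run result: every run of length ≥ 4 is removed.
def runB (ref : Int) (cnt : Nat) : List Int → List Int × Int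
  | [] =>
    if (cnt : Int) ≥ 4 then ([], ref * cnt) else (List.replicate cnt ref, 0)
  | x :: xs =>
    if x = ref then runB ref (cnt + 1) xs
    else if (cnt : Int) ≥ 4 then ((runB x 1 xs).1, ref * cnt + (runB x 1 xs).2)
    else (List.replicate cnt ref ++ (runB x 1 xs).1, (runB x 1 xs).2)

-- runs as B's first pass builds them
def runsFrom (v : Int) (c : Nat) : List Int → List (Int × Int)
  | [] => [(v, (c : Int))]
  | x :: xs => if x = v then runsFrom v (c + 1) xs else (v, (c : Int)) :: runsFrom x 1 xs

lemma foldl_stepRuns (xs : List Int) :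
    ∀ (R : List (Int × Int)) (v : Int) (c : Nat),
      List.foldl stepRuns (R ++ [(v, (c : Int))]) xs = R ++ runsFrom v c xs := by
  induction xs with
  | nil => intro R v c; simp [runsFrom]
  | cons x xs ih =>
    intro R v c
    rw [List.foldl_cons]
    by_cases hx : x = v
    · have hstep : stepRuns (R ++ [(v, (c : Int))]) x = R ++ [(v, ((c + 1 : Nat) : Int))] := by
        simp [stepRuns, hx]
      rw [hstep, ih, runsFrom, if_pos hx]
    · have hstep : stepRuns (R ++ [(v, (c : Int))]) x
          = (R ++ [(v, (c : Int))]) ++ [(x, ((1 : Nat) : Int))] := by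
        simp [stepRuns, Ne.symm hx]
      rw [hstep, ih, runsFrom, if_neg hx, List.append_assoc]
      simp

lemma foldl_stepOut (xs : List Int) :
    ∀ (v : Int) (c : Nat) (nq : List Int) (ans : Int),
      List.foldl stepOut (nq, ans) (runsFrom v c xs)
        = (nq ++ (runB v c xs).1, ans + (runB v c xs).2) := by
  induction xs with
  | nil =>
    intro v c nq ans
    by_cases hc : ((c : Int) ≥ 4)
    · simp [runsFrom, stepOut, runB, hc]
    · simp [runsFrom, stepOut, runB, hc]
  | cons x xs ih =>
    intro v c nq ans
    by_cases hx : x = v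
    · rw [runsFrom, if_pos hx, ih, runB, if_pos hx]
    · rw [runsFrom, if_neg hx, List.foldl_cons]
      by_cases hc : ((c : Int) ≥ 4)
      · rw [show stepOut (nq, ans) (v, (c : Int)) = (nq, ans + v * c) from by
          simp [stepOut, hc]]
        rw [ih, runB, if_neg hx, if_pos hc]
        simp [add_assoc]
      · rw [show stepOut (nq, ans) (v, (c : Int)) = (nq ++ List.replicate c v, ans) from by
          simp [stepOut, hc]]
        rw [ih, runB, if_neg hx, if_neg hc]
        simp [List.append_assoc]

lemma pop_alt_eq_runB (h : Int) (t : List Int) : pop_alt (h :: t) = runB h 1 t := by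
  have h1 : stepRuns [] h = [] ++ [(h, ((1 : Nat) : Int))] := by simp [stepRuns]
  rw [pop_alt, List.foldl_cons, h1, foldl_stepRuns, List.nil_append, foldl_stepOut]
  simp

-- the A-side loop invariant
lemma loopA (q : List Int) :
    ∀ (body : List Int) (cnt s m : Nat) (ref ans : Int) (K : List Int),
      1 ≤ cnt → cnt ≤ s → m ≤ s - cnt → s ≤ q.length → K.length ≤ m →
      body = q.drop s →
      (q.drop (s - cnt)).take cnt = List.replicate cnt ref →
      ((PySem.List.enumerate (body ++ [0]) (s : Int)).foldl (stepA q)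
          (ref, (cnt : Int), (m : Int) - (K.length : Int), ans, K ++ q.drop m)).2.2.2.2
        = K ++ (q.drop m).take (s - cnt - m) ++ (runA ref cnt body).1
      ∧ ((PySem.List.enumerate (body ++ [0]) (s : Int)).foldl (stepA q)
          (ref, (cnt : Int), (m : Int) - (K.length : Int), ans, K ++ q.drop m)).2.2.2.1
        = ans + (runA ref cnt body).2 := by
  intro body
  induction body with
  | nil =>
    intro cnt s m ref ans K h1 h2 h3 h4 h5 h6 h7
    have hs : s = q.length := by
      have := congrArg List.length h6
      simp at this
      omega
    have hdropm : q.drop m = (q.drop m).take (s - cnt - m) ++ List.replicate cnt ref := by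
      conv_lhs => rw [← List.take_append_drop (s - cnt - m) (q.drop m)]
      congr 1
      rw [List.drop_drop, show m + (s - cnt - m) = s - cnt from by omega, ← h7]
      exact (List.take_of_length_le (by simp; omega)).symm
    rw [List.nil_append, PySem.List.enumerate_cons, PySem.List.enumerate_nil,
      List.foldl_cons, List.foldl_nil]
    simp only [stepA]
    by_cases h0 : (0 : Int) = ref
    · rw [if_pos h0]
      have hA : runA ref cnt [] = (List.replicate cnt ref, 0) := by
        rw [runA, if_pos h0.symm]
      rw [hA]
      refine ⟨?_, by simp⟩
      show K ++ q.drop m = K ++ (q.drop m).take (s - cnt - m) ++ List.replicate cnt ref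
      rw [List.append_assoc, ← hdropm]
    · rw [if_neg h0]
      by_cases hcnt : ((cnt : Int) > 3)
      · rw [if_pos hcnt]
        have hA : runA ref cnt [] = ([], ref * cnt) := by
          rw [runA, if_neg (fun h => h0 h.symm), if_pos hcnt]
        have hb : (s : Int) - (cnt : Int) - ((m : Int) - (K.length : Int))
            = ((s - cnt - m + K.length : Nat) : Int) := by omega
        rw [hA, hb, PySem.List.slice_to_natCast, PySem.List.slice_from_natCast,
          show s - cnt - m + K.length = K.length + (s - cnt - m) from by omega,
          List.take_length_add_append, ← h6]
        exact ⟨by simp, rfl⟩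
      · rw [if_neg hcnt]
        have hA : runA ref cnt [] = (List.replicate cnt ref, 0) := by
          rw [runA, if_neg (fun h => h0 h.symm), if_neg hcnt]
        rw [hA]
        refine ⟨?_, by simp⟩
        show K ++ q.drop m = K ++ (q.drop m).take (s - cnt - m) ++ List.replicate cnt ref
        rw [List.append_assoc, ← hdropm]
  | cons x xs ih =>
    intro cnt s m ref ans K h1 h2 h3 h4 h5 h6 h7
    have hql : s < q.length := by
      have := congrArg List.length h6
      simp at this
      omega
    have hx1 : (q.drop s).take 1 = [x] := by rw [← h6]; simp
    have hxs : xs = q.drop (s + 1) := by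
      have hdd : (q.drop s).drop 1 = q.drop (s + 1) := by rw [List.drop_drop]
      rw [← hdd, ← h6]
      simp
    have hscast : (s : Int) + 1 = ((s + 1 : Nat) : Int) := by push_cast; ring
    rw [List.cons_append, PySem.List.enumerate_cons, List.foldl_cons]
    simp only [stepA]
    by_cases hx : x = ref
    · rw [if_pos hx]
      have hccast : (cnt : Int) + 1 = ((cnt + 1 : Nat) : Int) := by push_cast; ring
      rw [hccast, hscast]
      have hrun : (q.drop ((s + 1) - (cnt + 1))).take (cnt + 1) = List.replicate (cnt + 1) ref := by
        rw [show (s + 1) - (cnt + 1) = s - cnt from by omega, List.take_add, h7, List.drop_drop,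
          show s - cnt + cnt = s from by omega, hx1, hx, List.replicate_succ']
      have hIH := ih (cnt + 1) (s + 1) m ref ans K (by omega) (by omega) (by omega) (by omega)
        h5 hxs hrun
      rw [show (s + 1) - (cnt + 1) - m = s - cnt - m from by omega] at hIH
      have hA : runA ref cnt (x :: xs) = runA ref (cnt + 1) xs := by
        rw [runA, if_pos hx]
      rw [hA]
      exact hIH
    · rw [if_neg hx]
      by_cases hcnt : ((cnt : Int) > 3)
      · rw [if_pos hcnt]
        have hb : (s : Int) - (cnt : Int) - ((m : Int) - (K.length : Int))
            = ((s - cnt - m + K.length : Nat) : Int) := by omega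
        rw [hb, PySem.List.slice_to_natCast, PySem.List.slice_from_natCast,
          show s - cnt - m + K.length = K.length + (s - cnt - m) from by omega,
          List.take_length_add_append, hscast]
        have hKlen : (K ++ (q.drop m).take (s - cnt - m)).length = K.length + (s - cnt - m) := by
          simp
          omega
        have hIH := ih 1 (s + 1) s x (ans + ref * (cnt : Int))
          (K ++ (q.drop m).take (s - cnt - m)) le_rfl (by omega) (by omega) (by omega)
          (by rw [hKlen]; omega) hxs (by simpa using hx1)
        rw [Nat.cast_one] at hIH
        rw [show (s + 1) - 1 - s = 0 from by omega, List.take_zero, List.append_nil] at hIH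
        have htot : (m : Int) - (K.length : Int) + (cnt : Int)
            = ((s : Nat) : Int) - ((K ++ (q.drop m).take (s - cnt - m)).length : Int) := by
          rw [hKlen]
          push_cast
          omega
        rw [htot]
        have hA : runA ref cnt (x :: xs)
            = ((runA x 1 xs).1, ref * (cnt : Int) + (runA x 1 xs).2) := by
          rw [runA, if_neg hx, if_pos hcnt]
        rw [hA]
        refine ⟨?_, ?_⟩
        · simpa [List.append_assoc] using hIH.1
        · simpa [add_assoc] using hIH.2
      · rw [if_neg hcnt]
        have hIH := ih 1 (s + 1) m x ans K le_rfl (by omega) (by omega) (by omega) h5 hxs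
          (by simpa using hx1)
        rw [Nat.cast_one] at hIH
        rw [hscast]
        rw [show (s + 1) - 1 - m = s - m from by omega] at hIH
        have hsplit : (q.drop m).take (s - m)
            = (q.drop m).take (s - cnt - m) ++ List.replicate cnt ref := by
          rw [show s - m = (s - cnt - m) + cnt from by omega, List.take_add, List.drop_drop,
            show m + (s - cnt - m) = s - cnt from by omega, h7]
        rw [hsplit] at hIH
        have hA : runA ref cnt (x :: xs)
            = (List.replicate cnt ref ++ (runA x 1 xs).1, (runA x 1 xs).2) := by
          rw [runA, if_neg hx, if_neg hcnt]
        rw [hA]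
        refine ⟨?_, ?_⟩
        · simpa [List.append_assoc] using hIH.1
        · simpa using hIH.2

lemma pop_eq_runA (h : Int) (t : List Int) : pop (h :: t) = runA h 1 t := by
  have hmain := loopA (h :: t) t 1 1 0 h 0 [] le_rfl le_rfl (by omega) (by simp) (by simp)
    rfl (by simp)
  simp only [Nat.cast_one, Nat.cast_zero, List.length_nil, sub_zero, List.nil_append,
    List.drop_zero, Nat.sub_self, List.take_zero, zero_add] at hmain
  have hget : PySem.List.pyGet? (h :: t) 0 = some h := by simp [pysem]
  have hpop : pop (h :: t)
      = (((PySem.List.enumerate ((h :: t) ++ [0]) 0).foldl (stepA (h :: t))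
            (h, 0, 0, 0, h :: t)).2.2.2.2,
         ((PySem.List.enumerate ((h :: t) ++ [0]) 0).foldl (stepA (h :: t))
            (h, 0, 0, 0, h :: t)).2.2.2.1) := by
    unfold pop
    rw [hget]
  rw [hpop, List.cons_append, PySem.List.enumerate_cons, List.foldl_cons]
  simp only [stepA]
  simp only [if_true, zero_add]
  rw [Prod.ext_iff]
  exact ⟨hmain.1, hmain.2⟩

lemma replicate_shift (c : Nat) (v : Int) (xs : List Int) :
    List.replicate c v ++ v :: xs = List.replicate (c + 1) v ++ xs := by
  rw [List.replicate_succ', List.append_assoc, List.singleton_append]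

lemma runA_eq_runB (xs : List Int) :
    ∀ (v : Int) (c : Nat), 1 ≤ c →
      ¬ (([0, 0, 0, 0] : List Int) <:+ (List.replicate c v ++ xs)) →
      runA v c xs = runB v c xs := by
  induction xs with
  | nil =>
    intro v c hc hsuf
    by_cases hv : v = 0
    · have hc4 : ¬ ((c : Int) ≥ 4) := by
        intro h4
        apply hsuf
        refine ⟨List.replicate (c - 4) v, ?_⟩
        rw [show ([0, 0, 0, 0] : List Int) = List.replicate 4 v from by simp [hv], ← List.replicate_add]
        simp
        omega
      rw [runA, runB, if_pos hv, if_neg hc4]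
    · rw [runA, runB, if_neg hv]
      by_cases h4 : ((c : Int) ≥ 4)
      · rw [if_pos (by omega : (c : Int) > 3), if_pos h4]
      · rw [if_neg (by omega : ¬ (c : Int) > 3), if_neg h4]
  | cons x xs ih =>
    intro v c hc hsuf
    by_cases hx : x = v
    · subst hx
      rw [runA, if_pos rfl, runB, if_pos rfl]
      exact ih x (c + 1) (by omega) (by rwa [← replicate_shift])
    · have hsuf' : ¬ (([0, 0, 0, 0] : List Int) <:+ (List.replicate 1 x ++ xs)) := by
        intro h
        exact hsuf (List.suffix_append_of_suffix (by simpa using h))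
      have hrec := ih x 1 le_rfl hsuf'
      rw [runA, if_neg hx, runB, if_neg hx, hrec]
      by_cases h4 : ((c : Int) ≥ 4)
      · rw [if_pos (by omega : (c : Int) > 3), if_pos h4]
      · rw [if_neg (by omega : ¬ (c : Int) > 3), if_neg h4]

lemma runB_len_lt_runA_len (xs : List Int) :
    ∀ (v : Int) (c : Nat), 1 ≤ c →
      (([0, 0, 0, 0] : List Int) <:+ (List.replicate c v ++ xs)) →
      (runB v c xs).1.length < (runA v c xs).1.length := by
  induction xs with
  | nil =>
    intro v c hc hsuf
    have hv : v = 0 := by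
      have h0 : (0 : Int) ∈ List.replicate c v := by
        have := hsuf.subset (show (0 : Int) ∈ [0, 0, 0, 0] by simp)
        simpa using this
      exact (List.eq_of_mem_replicate h0).symm
    have hc4 : 4 ≤ c := by
      have := hsuf.length_le
      simpa using this
    rw [runA, runB, if_pos hv, if_pos (by omega : (c : Int) ≥ 4)]
    simp
    omega
  | cons x xs ih =>
    intro v c hc hsuf
    by_cases hx : x = v
    · subst hx
      rw [runA, if_pos rfl, runB, if_pos rfl]
      exact ih x (c + 1) (by omega) (by rwa [← replicate_shift])
    · have hvx : v :: x :: xs <:+ List.replicate c v ++ x :: xs := by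
        refine ⟨List.replicate (c - 1) v, ?_⟩
        rw [show v :: x :: xs = [v] ++ x :: xs from rfl, ← List.append_assoc]
        congr 1
        rw [show ([v] : List Int) = List.replicate 1 v from rfl, ← List.replicate_add]
        congr 1
        omega
      have hlen : 4 ≤ (x :: xs).length := by
        by_contra hlt
        have hshort : (v :: x :: xs).length ≤ ([0, 0, 0, 0] : List Int).length := by
          simp at hlt ⊢
          omega
        have hsub : v :: x :: xs <:+ ([0, 0, 0, 0] : List Int) :=
          List.suffix_of_suffix_length_le hvx hsuf hshort
        have hv0 : v = 0 := by
          have : v ∈ ([0, 0, 0, 0] : List Int) := hsub.subset (by simp)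
          simpa using this
        have hx0 : x = 0 := by
          have : x ∈ ([0, 0, 0, 0] : List Int) := hsub.subset (by simp)
          simpa using this
        exact hx (by rw [hv0, hx0])
      have hsufx : ([0, 0, 0, 0] : List Int) <:+ x :: xs := by
        have hxx : x :: xs <:+ List.replicate c v ++ x :: xs := List.suffix_append _ _
        exact List.suffix_of_suffix_length_le hsuf hxx (by simpa using hlen)
      have hrec := ih x 1 le_rfl (by simpa using hsufx)
      rw [runA, if_neg hx, runB, if_neg hx]
      by_cases h4 : ((c : Int) ≥ 4)
      · rw [if_pos (by omega : (c : Int) > 3), if_pos h4]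
        exact hrec
      · rw [if_neg (by omega : ¬ (c : Int) > 3), if_neg h4]
        simpa using hrec

-- ===== VERDICT (by name: the statement is the Claim_ definition above) =====
theorem pop_spec : Claim_unchanged_pop := by
  intro q _ hpre hd
  match q with
  | [] => exact absurd rfl hpre
  | h :: t =>
    rw [pop_eq_runA, pop_alt_eq_runB]
    exact runA_eq_runB t h 1 le_rfl (by simpa [D_pop] using hd)

theorem pop_changed : Claim_changed_pop := by unfold Claim_changed_pop; decide

theorem pop_tight : Claim_exact_pop := by
  intro q _ hpre hd heq
  match q with
  | [] => exact absurd rfl hpre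
  | h :: t =>
    rw [pop_eq_runA, pop_alt_eq_runB] at heq
    have := runB_len_lt_runA_len t h 1 le_rfl (by simpa [D_pop] using hd)
    rw [heq] at this
    omega
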